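-- pv_equiv track=rewrite | github.com/jskwak98/PS | BOJ/1_BruteForce/18428.py | check
-- ===== SOURCE A (Python) =====
-- from copy import deepcopy
--
-- def check(teachers, obstacles):
--     """
--     You have students checked by teacher in teachers dictionary, key : teacher, value : students set
--     by checking obstacles are in between students and teacher, you erase them from
--     deep copied dictionary ts.
--     at final, if you check there's no one left in ts, the obstacles have
--     successfully hindered teachers' sights
--     """
--     ts = deepcopy(teachers)
--     for obstacle in obstacles:
--         for teacher in teachers:
--             for student in teachers[teacher]:
--                 if teacher[0] == student[0] == obstacle[0] and min(teacher[1], student[1]) < obstacle[1] < max(teacher[1], student[1]):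
--                     if student in ts[teacher]:
--                         ts[teacher].remove(student)
--                 elif teacher[1] == student[1] == obstacle[1] and min(teacher[0], student[0]) < obstacle[0] < max(teacher[0], student[0]):
--                     if student in ts[teacher]:
--                         ts[teacher].remove(student)
--     for teacher in ts:
--         if len(ts[teacher]) != 0:
--             return False
--     return True
-- ===== SOURCE B (Python) =====
-- def _between(vals, a, b):
--     # is there a value strictly between a and b in vals?
--     lo, hi = (a, b) if a < b else (b, a)
--     for v in vals:
--         if lo < v < hi:
--             return True
--     return False
--
--
-- def check(teachers, obstacles):
--     # Index the obstacles once: columns per row, rows per column; then ask,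
--     # for every teacher-student pair sharing a row or column, whether the
--     # matching bucket holds a blocker strictly between them.
--     rows = {}
--     cols = {}
--     for r, c in obstacles:
--         rows.setdefault(r, []).append(c)
--         cols.setdefault(c, []).append(r)
--     for (tr, tc), students in teachers.items():
--         for (sr, sc) in students:
--             row_ok = tr == sr and _between(rows.get(tr, []), tc, sc)
--             col_ok = tc == sc and _between(cols.get(tc, []), tr, sr)
--             if not (row_ok or col_ok):
--                 return False
--     return True
-- ===== Notes on version B (the rewrite author's own statement) =====
-- stated objective: alternative
-- what changed: Instead of scanning every obstacle against every teacher-student pair while erasing students from a deep-copied dict, B indexes the obstacles once into per-row and per-column buckets and then, per teacher-student pair, only scans the one bucket of the shared row/column for a blocker, returning False at the first unblocked pair.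
import Mathlib
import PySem

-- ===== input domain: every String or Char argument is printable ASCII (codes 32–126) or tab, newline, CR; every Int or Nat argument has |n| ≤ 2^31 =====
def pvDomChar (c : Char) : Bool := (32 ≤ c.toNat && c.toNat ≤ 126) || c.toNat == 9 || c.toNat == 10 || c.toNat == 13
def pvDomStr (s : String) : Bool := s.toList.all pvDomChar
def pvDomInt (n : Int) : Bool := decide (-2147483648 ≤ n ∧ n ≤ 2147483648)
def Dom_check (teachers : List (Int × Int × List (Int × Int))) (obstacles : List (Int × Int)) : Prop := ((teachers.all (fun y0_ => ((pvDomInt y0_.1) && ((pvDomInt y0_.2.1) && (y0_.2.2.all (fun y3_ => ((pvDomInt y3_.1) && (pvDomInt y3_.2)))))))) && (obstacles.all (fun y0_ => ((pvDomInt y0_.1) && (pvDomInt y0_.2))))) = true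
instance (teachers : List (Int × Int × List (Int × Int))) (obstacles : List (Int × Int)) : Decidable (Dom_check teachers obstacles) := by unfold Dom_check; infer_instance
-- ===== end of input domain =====

-- B replaces A's obstacle-by-obstacle erasure from a deep-copied dict by per-row/per-column
-- obstacle buckets built once, scanning only the shared row/column bucket per pair (objective: alternative).
-- Input decoding shared by both ports: the Python argument `teachers` is a dict mapping a
-- teacher position to a SET of student positions; the assoc list is decoded dict-wise
-- (duplicate teacher keys overwrite, duplicate students dedup), exactly as Python builds it.
def pvTeachDict (teachers : List (Int × Int × List (Int × Int))) :
    PySem.Dict (Int × Int) (PySem.Set (Int × Int)) :=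
  teachers.foldl (fun d p => d.insert (p.1, p.2.1) (PySem.Set.ofList p.2.2)) PySem.Dict.empty

-- ===== PORT A =====
-- `if student in ts[teacher]: ts[teacher].remove(student)`: the key `teacher` is always
-- present in ts (same keys as teachers), so the raising lookup ts[teacher] is exact as getD;
-- the guarded set.remove is Set.discard.
def pvRemove (ts : PySem.Dict (Int × Int) (PySem.Set (Int × Int))) (t s : Int × Int) :
    PySem.Dict (Int × Int) (PySem.Set (Int × Int)) :=
  if (ts.getD t []).contains s then ts.insert t (PySem.Set.discard (ts.getD t []) s) else ts

-- body of A's innermost loop, for obstacle o, teacher t, student s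
def pvStepS (o t : Int × Int) (ts : PySem.Dict (Int × Int) (PySem.Set (Int × Int)))
    (s : Int × Int) : PySem.Dict (Int × Int) (PySem.Set (Int × Int)) :=
  if t.1 = s.1 ∧ s.1 = o.1 ∧ min t.2 s.2 < o.2 ∧ o.2 < max t.2 s.2 then
    pvRemove ts t s
  else if t.2 = s.2 ∧ s.2 = o.2 ∧ min t.1 s.1 < o.1 ∧ o.1 < max t.1 s.1 then
    pvRemove ts t s
  else ts

def pvStepT (T : PySem.Dict (Int × Int) (PySem.Set (Int × Int))) (o : Int × Int)
    (ts : PySem.Dict (Int × Int) (PySem.Set (Int × Int))) (t : Int × Int) :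
    PySem.Dict (Int × Int) (PySem.Set (Int × Int)) :=
  (T.getD t []).foldl (pvStepS o t) ts

def check (teachers : List (Int × Int × List (Int × Int))) (obstacles : List (Int × Int)) : Bool :=
  let T := pvTeachDict teachers
  -- ts = deepcopy(teachers); triple loop over obstacles, teachers, teachers[teacher]
  let ts := obstacles.foldl (fun ts o => T.keys.foldl (pvStepT T o) ts) T
  -- for teacher in ts: if len(ts[teacher]) != 0: return False / return True
  ts.keys.all (fun t => PySem.List.len (ts.getD t []) == 0)

-- ===== PORT B =====
-- `lo, hi = (a, b) if a < b else (b, a)`, then early-return scan of the bucket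
def pvBetween (vals : List Int) (a b : Int) : Bool :=
  let lo := if a < b then a else b
  let hi := if a < b then b else a
  vals.any (fun v => lo < v && v < hi)

def check_alt (teachers : List (Int × Int × List (Int × Int))) (obstacles : List (Int × Int)) : Bool :=
  -- one pass over the obstacles filling both buckets (rows.setdefault(r, []).append(c) …)
  let rc := obstacles.foldl
    (fun rc o => (rc.1.modify o.1 [] (fun l => l ++ [o.2]), rc.2.modify o.2 [] (fun l => l ++ [o.1])))
    ((PySem.Dict.empty : PySem.Dict Int (List Int)), (PySem.Dict.empty : PySem.Dict Int (List Int)))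
  let rows := rc.1
  let cols := rc.2
  -- for (tr, tc), students in teachers.items(): … early `return False` becomes `all`
  (pvTeachDict teachers).items.all (fun p =>
    p.2.all (fun s =>
      let rowOk := p.1.1 == s.1 && pvBetween (rows.getD p.1.1 []) p.1.2 s.2
      let colOk := p.1.2 == s.2 && pvBetween (cols.getD p.1.2 []) p.1.1 s.1
      rowOk || colOk))

-- ===== PRECONDITION & SPEC =====
def Spec_check (teachers : List (Int × Int × List (Int × Int))) (obstacles : List (Int × Int)) (out : Bool) : Prop := out = check_alt teachers obstacles
instance (teachers : List (Int × Int × List (Int × Int))) (obstacles : List (Int × Int)) (out : Bool) : Decidable (Spec_check teachers obstacles out) := by unfold Spec_check; infer_instance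

-- ===== CLAIM (what is proved, stated in full; the proofs are below) =====
def Claim_equal_check : Prop := ∀ (teachers : List (Int × Int × List (Int × Int))) (obstacles : List (Int × Int)), Dom_check teachers obstacles → Spec_check teachers obstacles (check teachers obstacles)

-- ===== LEMMAS AND PROOFS =====

-- "obstacle o blocks the sight between teacher t and student s" (A's two conditions)
def blk (t s o : Int × Int) : Bool :=
  decide (t.1 = s.1 ∧ s.1 = o.1 ∧ min t.2 s.2 < o.2 ∧ o.2 < max t.2 s.2) ||
  decide (t.2 = s.2 ∧ s.2 = o.2 ∧ min t.1 s.1 < o.1 ∧ o.1 < max t.1 s.1)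

theorem pvStepS_eq_ite (o t ts s) :
    pvStepS o t ts s = if blk t s o then pvRemove ts t s else ts := by
  unfold pvStepS blk
  by_cases h1 : (t.1 = s.1 ∧ s.1 = o.1 ∧ min t.2 s.2 < o.2 ∧ o.2 < max t.2 s.2)
  · rw [if_pos h1, if_pos (by simp [h1])]
  · by_cases h2 : (t.2 = s.2 ∧ s.2 = o.2 ∧ min t.1 s.1 < o.1 ∧ o.1 < max t.1 s.1)
    · rw [if_neg h1, if_pos h2, if_pos (by simp [h2])]
    · rw [if_neg h1, if_neg h2, if_neg (by simpa using not_or.mpr ⟨h1, h2⟩)]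

theorem pvRemove_getD_ne {t' t : Int × Int} (h : t' ≠ t) (ts s d) :
    (pvRemove ts t s).getD t' d = ts.getD t' d := by
  unfold pvRemove; split
  · rw [PySem.Dict.getD_insert_of_ne ts _ d h]
  · rfl

theorem pvRemove_getD_self (ts : PySem.Dict (Int × Int) (PySem.Set (Int × Int))) (t s) :
    (pvRemove ts t s).getD t [] = (ts.getD t []).filter (fun x => !(x == s)) := by
  unfold pvRemove; split
  · rw [PySem.Dict.getD_insert_self]
    simp [PySem.Set.discard]
  · rename_i h
    symm; apply List.filter_eq_self.mpr
    intro a ha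
    simp only [Bool.not_eq_eq_eq_not, Bool.not_true, beq_eq_false_iff_ne, ne_eq]
    rintro rfl
    simp at h
    exact h ha

theorem pvRemove_keys (ts : PySem.Dict (Int × Int) (PySem.Set (Int × Int))) (t s) :
    (pvRemove ts t s).keys = ts.keys := by
  unfold pvRemove; split
  · rename_i h
    have hc : ts.contains t = true := by
      by_contra hc
      rw [PySem.Dict.getD_of_not_contains ts [] (by simpa using hc)] at h
      simp at h
    rw [PySem.Dict.keys_insert_of_contains ts _ hc]
  · rfl

theorem foldS_keys (o t : Int × Int) (ss : List (Int × Int)) :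
    ∀ ts, (ss.foldl (pvStepS o t) ts).keys = ts.keys := by
  induction ss with
  | nil => intro ts; rfl
  | cons s tl ih =>
      intro ts
      rw [List.foldl_cons, ih, pvStepS_eq_ite]
      split
      · exact pvRemove_keys ts t s
      · rfl

theorem foldS_getD (o t : Int × Int) (ss : List (Int × Int)) :
    ∀ (ts : PySem.Dict (Int × Int) (PySem.Set (Int × Int))) (t' : Int × Int),
      (ss.foldl (pvStepS o t) ts).getD t' [] =
        if t' = t then (ts.getD t []).filter (fun x => !(ss.contains x && blk t x o))
        else ts.getD t' [] := by
  induction ss with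
  | nil =>
      intro ts t'
      simp only [List.foldl_nil, List.contains_eq_mem]
      split
      · rename_i h; subst h; simp
      · rfl
  | cons s tl ih =>
      intro ts t'
      rw [List.foldl_cons, ih, pvStepS_eq_ite]
      by_cases ht : t' = t
      · subst ht
        simp only []
        by_cases hb : blk t' s o = true
        · rw [if_pos hb, pvRemove_getD_self, List.filter_filter]
          apply List.filter_congr
          intro x _
          by_cases hx : x = s
          · subst hx; simp [hb]
          · simp [hx]
        · rw [if_neg hb]
          apply List.filter_congr
          intro x _
          by_cases hx : x = s
          · subst hx
            simp [Bool.eq_false_iff.mp (by simpa using hb)]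
          · simp [hx]
      · rw [if_neg ht, if_neg ht]
        split
        · exact pvRemove_getD_ne ht ts s []
        · rfl

theorem foldT_keys (T : PySem.Dict (Int × Int) (PySem.Set (Int × Int))) (o : Int × Int)
    (ks : List (Int × Int)) :
    ∀ ts, (ks.foldl (pvStepT T o) ts).keys = ts.keys := by
  induction ks with
  | nil => intro ts; rfl
  | cons k tl ih =>
      intro ts
      rw [List.foldl_cons, ih]
      exact foldS_keys o k _ ts

theorem foldT_getD (T : PySem.Dict (Int × Int) (PySem.Set (Int × Int))) (o : Int × Int)
    (ks : List (Int × Int)) (hnd : ks.Nodup) :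
    ∀ ts t', (ks.foldl (pvStepT T o) ts).getD t' [] =
      if t' ∈ ks then (ts.getD t' []).filter (fun x => !((T.getD t' []).contains x && blk t' x o))
      else ts.getD t' [] := by
  induction ks with
  | nil => intro ts t'; simp
  | cons k tl ih =>
      intro ts t'
      rw [List.foldl_cons, ih (List.Nodup.of_cons hnd)]
      unfold pvStepT
      rw [foldS_getD]
      by_cases h1 : t' ∈ tl
      · have hne : t' ≠ k := by
          rintro rfl; exact (List.nodup_cons.mp hnd).1 h1
        rw [if_pos h1, if_neg hne, if_pos (List.mem_cons.mpr (Or.inr h1))]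
      · by_cases h2 : t' = k
        · subst h2
          rw [if_neg h1, if_pos rfl, if_pos (List.mem_cons_self)]
          rfl
        · rw [if_neg h1, if_neg h2, if_neg (by simp [h1, h2])]

theorem foldO_keys (T : PySem.Dict (Int × Int) (PySem.Set (Int × Int))) (obs : List (Int × Int)) :
    ∀ ts, (obs.foldl (fun ts o => T.keys.foldl (pvStepT T o) ts) ts).keys = ts.keys := by
  induction obs with
  | nil => intro ts; rfl
  | cons o tl ih =>
      intro ts
      rw [List.foldl_cons, ih]
      exact foldT_keys T o T.keys ts

theorem foldO_getD (T : PySem.Dict (Int × Int) (PySem.Set (Int × Int))) (hnd : T.keys.Nodup)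
    (obs : List (Int × Int)) :
    ∀ ts t', ((obs.foldl (fun ts o => T.keys.foldl (pvStepT T o) ts) ts).getD t' []) =
      if t' ∈ T.keys then
        (ts.getD t' []).filter (fun x => !((T.getD t' []).contains x && obs.any (fun o => blk t' x o)))
      else ts.getD t' [] := by
  induction obs with
  | nil =>
      intro ts t'
      simp only [List.foldl_nil, List.any_nil, Bool.and_false, Bool.not_false, List.filter_true]
      split <;> rfl
  | cons o tl ih =>
      intro ts t'
      rw [List.foldl_cons, ih, foldT_getD T o T.keys hnd]
      by_cases h : t' ∈ T.keys
      · rw [if_pos h, if_pos h, if_pos h, List.filter_filter]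
        apply List.filter_congr
        intro x _
        cases hc : (T.getD t' []).contains x <;> cases hb : blk t' x o <;> simp [hb]
      · rw [if_neg h, if_neg h, if_neg h]

theorem teachDict_nodup (teachers : List (Int × Int × List (Int × Int))) :
    (pvTeachDict teachers).keys.Nodup :=
  PySem.Dict.nodup_keys_foldl_insert_key teachers (fun p => (p.1, p.2.1))
    (fun _ p => PySem.Set.ofList p.2.2) PySem.Dict.empty PySem.Dict.nodup_keys_empty

theorem len_filter_all (l : PySem.Set (Int × Int)) (p : Int × Int → Bool) :
    (PySem.List.len (l.filter (fun x => !(l.contains x && p x))) == 0) = l.all (fun x => p x) := by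
  apply Bool.eq_iff_iff.mpr
  rw [beq_iff_eq, PySem.List.len_eq]
  have : (List.filter (fun x => !(l.contains x && p x)) l).length = 0 ↔
      List.filter (fun x => !(l.contains x && p x)) l = [] := List.length_eq_zero_iff
  rw [show ((List.filter (fun x => !(l.contains x && p x)) l).length : Int) = 0 ↔
      (List.filter (fun x => !(l.contains x && p x)) l).length = 0 by exact_mod_cast Iff.rfl, this,
    List.filter_eq_nil_iff, List.all_eq_true]
  constructor
  · intro h x hx
    have := h x hx
    simpa [List.contains_eq_mem, hx] using this
  · intro h x hx
    simp [List.contains_eq_mem, hx, h x hx]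

theorem check_char (teachers : List (Int × Int × List (Int × Int))) (obstacles : List (Int × Int)) :
    check teachers obstacles =
      (pvTeachDict teachers).keys.all (fun t =>
        ((pvTeachDict teachers).getD t []).all (fun s => obstacles.any (fun o => blk t s o))) := by
  unfold check
  dsimp only
  rw [foldO_keys (pvTeachDict teachers) obstacles (pvTeachDict teachers)]
  apply Bool.eq_iff_iff.mpr
  simp only [List.all_eq_true]
  constructor
  · intro h t ht
    have := h t ht
    rw [foldO_getD (pvTeachDict teachers) (teachDict_nodup teachers) obstacles
      (pvTeachDict teachers) t, if_pos ht, len_filter_all] at this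
    exact List.all_eq_true.mp this
  · intro h t ht
    rw [foldO_getD (pvTeachDict teachers) (teachDict_nodup teachers) obstacles
      (pvTeachDict teachers) t, if_pos ht, len_filter_all]
    exact List.all_eq_true.mpr (h t ht)

theorem pvBetween_iff (vals : List Int) (a b : Int) :
    pvBetween vals a b = true ↔ ∃ v ∈ vals, min a b < v ∧ v < max a b := by
  unfold pvBetween
  have hlo : (if a < b then a else b) = min a b := by split <;> omega
  have hhi : (if a < b then b else a) = max a b := by split <;> omega
  rw [hlo, hhi]
  simp [List.any_eq_true]

theorem rowcol (t s : Int × Int) (obstacles : List (Int × Int)) :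
    ((t.1 == s.1 && pvBetween ((obstacles.filter (fun o => o.1 == t.1)).map (fun x => x.2)) t.2 s.2)
      || (t.2 == s.2 && pvBetween (((obstacles.map (fun o => (o.2, o.1))).filter (fun p => p.1 == t.2)).map (fun x => x.2)) t.1 s.1))
    = obstacles.any (fun o => blk t s o) := by
  apply Bool.eq_iff_iff.mpr
  simp only [Bool.or_eq_true, Bool.and_eq_true, beq_iff_eq, pvBetween_iff, List.mem_map,
    List.mem_filter, List.any_eq_true, blk, decide_eq_true_eq]
  constructor
  · rintro (⟨h, v, ⟨o, ⟨ho, h1⟩, rfl⟩, hb⟩ | ⟨h, v, ⟨p, ⟨⟨o, ho, rfl⟩, h1⟩, rfl⟩, hb⟩)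
    · exact ⟨o, ho, Or.inl ⟨h, by omega, hb.1, hb.2⟩⟩
    · dsimp at h1 hb
      exact ⟨o, ho, Or.inr ⟨h, by omega, hb.1, hb.2⟩⟩
  · rintro ⟨o, ho, ⟨h1, h2, h3, h4⟩ | ⟨h1, h2, h3, h4⟩⟩
    · exact Or.inl ⟨h1, o.2, ⟨o, ⟨ho, by omega⟩, rfl⟩, h3, h4⟩
    · exact Or.inr ⟨h1, o.1, ⟨(o.2, o.1), ⟨⟨o, ho, rfl⟩, by dsimp; omega⟩, rfl⟩, h3, h4⟩

theorem check_alt_char (teachers : List (Int × Int × List (Int × Int))) (obstacles : List (Int × Int)) :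
    check_alt teachers obstacles =
      (pvTeachDict teachers).keys.all (fun t =>
        ((pvTeachDict teachers).getD t []).all (fun s => obstacles.any (fun o => blk t s o))) := by
  unfold check_alt
  dsimp only
  rw [show (List.foldl (fun (rc : PySem.Dict Int (List Int) × PySem.Dict Int (List Int)) (o : Int × Int) => (rc.1.modify o.1 [] (fun l => l ++ [o.2]), rc.2.modify o.2 [] (fun l => l ++ [o.1]))) (PySem.Dict.empty, PySem.Dict.empty) obstacles)
      = (List.foldl (fun (d : PySem.Dict Int (List Int)) (o : Int × Int) => d.modify o.1 [] (fun l => l ++ [o.2])) PySem.Dict.empty obstacles,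
         List.foldl (fun (d : PySem.Dict Int (List Int)) (o : Int × Int) => d.modify o.2 [] (fun l => l ++ [o.1])) PySem.Dict.empty obstacles)
      from PySem.List.foldl_prod_mk (fun (d : PySem.Dict Int (List Int)) (o : Int × Int) => d.modify o.1 [] (fun l => l ++ [o.2])) (fun (d : PySem.Dict Int (List Int)) (o : Int × Int) => d.modify o.2 [] (fun l => l ++ [o.1])) obstacles PySem.Dict.empty PySem.Dict.empty]
  rw [PySem.Dict.items_eq_map_keys _ (teachDict_nodup teachers) ([] : PySem.Set (Int × Int)),
    List.all_map]
  apply Bool.eq_iff_iff.mpr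
  simp only [List.all_eq_true]
  refine forall_congr' fun t => imp_congr_right fun _ => ?_
  have hrows : (List.foldl (fun (d : PySem.Dict Int (List Int)) (o : Int × Int) => d.modify o.1 [] (fun l => l ++ [o.2])) PySem.Dict.empty obstacles).getD t.1 [] =
      (obstacles.filter (fun o => o.1 == t.1)).map (fun x => x.2) := by
    rw [PySem.Dict.getD_foldl_modify_append obstacles PySem.Dict.empty t.1]
    simp
  have hcols : (List.foldl (fun (d : PySem.Dict Int (List Int)) (o : Int × Int) => d.modify o.2 [] (fun l => l ++ [o.1])) PySem.Dict.empty obstacles).getD t.2 [] =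
      ((obstacles.map (fun o => (o.2, o.1))).filter (fun p => p.1 == t.2)).map (fun x => x.2) := by
    rw [← List.foldl_map (f := fun o : Int × Int => (o.2, o.1))
      (g := fun (d : PySem.Dict Int (List Int)) (p : Int × Int) => d.modify p.1 [] (fun l => l ++ [p.2])),
      PySem.Dict.getD_foldl_modify_append _ PySem.Dict.empty t.2]
    simp
  simp only [Function.comp_apply, List.all_eq_true]
  refine forall_congr' fun s => imp_congr_right fun _ => ?_
  rw [hrows, hcols, rowcol]

-- ===== VERDICT (by name: the statement is the Claim_ definition above) =====
theorem check_spec : Claim_equal_check := by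
  intro teachers obstacles _
  unfold Spec_check
  rw [check_char, check_alt_char]
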